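-- pv_equiv track=rewrite | github.com/Sincer1ty/Algorithm | 2025_05/lc_3355/lc_3355_aehyemin_TL.py | isZeroArray
-- ===== SOURCE A (Python) =====
-- from typing import List
--
-- def isZeroArray(nums: List[int], queries: List[List[int]]) -> bool:
--     #transform 후에 zero array 로 반환할 수 있으면 true, 아니면 false
--     #각각의 쿼리[i]에 대해,
--     #1. [l,r]범위 내, 하위 집합을 선택한다.
--     #2. 선택된 인덱스 값을 1씩 감소시킨다.
--     for j in range(len(queries)):
--         l = queries[j][0]
--         r = queries[j][1]
--
--         for i in range(l,r+1):
--             if nums[i] == 0: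
--                 continue
--             nums[i] -= 1
--
--     a = set(nums)
--
--     if len(a) == 1 and 0 in a:
--         return True
--     return False
-- ===== SOURCE B (Python) =====
-- from typing import List
--
-- def isZeroArray(nums: List[int], queries: List[List[int]]) -> bool:
--     n = len(nums)
--     diff = [0] * (n + 1)
--     for q in queries:
--         l, r = q[0], q[1]
--         if l <= r:
--             diff[l] += 1
--             diff[r + 1] -= 1
--     cov = 0
--     for i, x in enumerate(nums):
--         cov += diff[i]
--         if not 0 <= x <= cov:
--             return False
--     return True
-- ===== Notes on version B (the rewrite author's own statement) =====
-- stated objective: faster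
-- what changed: Replaces A's per-query decrement of every index in [l,r] (and final set() test) with a difference array counting query coverage followed by one prefix-sum pass checking 0 <= nums[i] <= coverage[i]; B does not mutate nums. Pre_ restricts to the task's natural domain (nonempty nums; each query's non-empty range inside the array), excluding empty nums, where A's False and B's vacuous True are equally defensible for a degenerate input, and queries with negative bounds, whose value in A comes from Python's accidental negative-index aliasing.
-- outside the precondition, e.g. on isZeroArray([], []): A returns False, B returns True; on isZeroArray([1], [[-1, 0]]): A returns True, B returns False
import Mathlib
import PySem

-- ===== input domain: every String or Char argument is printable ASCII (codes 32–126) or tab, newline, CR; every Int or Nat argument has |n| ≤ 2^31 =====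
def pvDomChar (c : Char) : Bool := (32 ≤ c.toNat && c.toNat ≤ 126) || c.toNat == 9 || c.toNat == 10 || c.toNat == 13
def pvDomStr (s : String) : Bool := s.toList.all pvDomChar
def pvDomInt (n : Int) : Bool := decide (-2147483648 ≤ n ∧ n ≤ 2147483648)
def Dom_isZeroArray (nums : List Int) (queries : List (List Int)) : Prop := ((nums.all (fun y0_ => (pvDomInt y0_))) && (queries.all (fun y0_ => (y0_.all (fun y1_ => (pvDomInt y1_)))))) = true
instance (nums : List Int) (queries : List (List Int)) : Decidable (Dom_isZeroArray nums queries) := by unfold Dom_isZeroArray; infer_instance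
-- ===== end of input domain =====

-- B replaces A's per-query decrement of every index in [l,r] (and the final set() test) with a
-- difference array counting query coverage plus one prefix-sum pass checking 0 <= nums[i] <= coverage;
-- note A mutates its nums argument in place, B does not — the equivalence proved here is about the
-- RETURN value only.

-- ===== PORT A =====
-- for i in range(l, r+1): if nums[i] == 0: continue; nums[i] -= 1   (read via pyGet?, write via pySetD)
def pvDecRange (nums : List Int) (l r : Int) : List Int :=
  (PySem.List.pyRange l (r + 1) 1).foldl
    (fun acc i =>
      match PySem.List.pyGet? acc i with
      | none => acc
      | some v => if v = 0 then acc else PySem.List.pySetD acc i (v - 1))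
    nums

def isZeroArray (nums : List Int) (queries : List (List Int)) : Bool :=
  -- for j in range(len(queries)): l = queries[j][0]; r = queries[j][1]; inner loop
  let final := queries.foldl
    (fun acc q => pvDecRange acc (PySem.List.pyGetD q 0 0) (PySem.List.pyGetD q 1 0)) nums
  -- a = set(nums); if len(a) == 1 and 0 in a: return True; return False
  let a : PySem.Set Int := PySem.Set.ofList final
  if a.length = 1 ∧ PySem.Set.contains a 0 = true then true else false

-- ===== PORT B =====
-- one query's difference-array update: if l <= r: diff[l] += 1; diff[r+1] -= 1
def pvAddQuery (d : List Int) (q : List Int) : List Int :=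
  let l := PySem.List.pyGetD q 0 0
  let r := PySem.List.pyGetD q 1 0
  if l ≤ r then
    let t := PySem.List.pySetD d l (PySem.List.pyGetD d l 0 + 1)
    PySem.List.pySetD t (r + 1) (PySem.List.pyGetD t (r + 1) 0 - 1)
  else d

-- cov += diff[i]; if not 0 <= x <= cov: return False   (walk nums and diff together)
def pvCheck : List Int → List Int → Int → Bool
  | [], _, _ => true
  | x :: xs, dv :: ds, cov =>
      let cov' := cov + dv
      if 0 ≤ x ∧ x ≤ cov' then pvCheck xs ds cov' else false
  | _ :: _, [], _ => true   -- unreachable: diff always has nums.length + 1 entries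

def isZeroArray_alt (nums : List Int) (queries : List (List Int)) : Bool :=
  let diff := queries.foldl pvAddQuery (List.replicate (nums.length + 1) 0)
  pvCheck nums diff 0

-- ===== PRECONDITION & SPEC =====
-- q is a query in the task's natural domain for length n: it has at least two entries, and its
-- range [l, r] is either empty (r < l) or lies inside the array (0 ≤ l and r < n)
def pvQok (n : Int) (q : List Int) : Bool :=
  match q with
  | l :: r :: _ => decide (r < l) || (decide (0 ≤ l) && decide (r < n))
  | _ => false

-- Pre_ restricts to the task's natural domain: nonempty nums and queries [l, r, ...] whose non-empty
-- ranges lie inside the array.  It thereby excludes two corners on which A still returns: empty nums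
-- (A's False via the empty set() and B's vacuous True are both defensible for a degenerate input
-- nobody would specify) and queries with a negative bound, where A's value comes from Python's
-- accidental negative-index aliasing; see claim.json cites.
def Pre_isZeroArray (nums : List Int) (queries : List (List Int)) : Prop :=
  nums ≠ [] ∧ queries.all (pvQok (nums.length : Int)) = true

instance (nums : List Int) (queries : List (List Int)) : Decidable (Pre_isZeroArray nums queries) := by
  unfold Pre_isZeroArray; infer_instance

def pvWitness_isZeroArray : List Int × List (List Int) := ([1, 0], [[0, 1], [0, 0]])

def Spec_isZeroArray (nums : List Int) (queries : List (List Int)) (out : Bool) : Prop := out = isZeroArray_alt nums queries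
instance (nums : List Int) (queries : List (List Int)) (out : Bool) : Decidable (Spec_isZeroArray nums queries out) := by unfold Spec_isZeroArray; infer_instance

-- ===== CLAIM (what is proved, stated in full; the proofs are below) =====
def Claim_equal_isZeroArray : Prop := ∀ (nums : List Int) (queries : List (List Int)), Dom_isZeroArray nums queries → Pre_isZeroArray nums queries → Spec_isZeroArray nums queries (isZeroArray nums queries)

-- ===== LEMMAS AND PROOFS =====

-- one Python decrement step: x if x == 0 else x - 1
def pvDecOp (x : Int) : Int := if x = 0 then x else x - 1

def pvQCov (n : Nat) (l r k : Int) : Nat :=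
  (if l ≤ k ∧ k ≤ r then 1 else 0) + (if l ≤ k - n ∧ k - n ≤ r then 1 else 0)

-- total number of decrements all queries apply to position k of a list of length n
def pvCnt (n : Nat) (qs : List (List Int)) (k : Int) : Nat :=
  (qs.map (fun q => pvQCov n (PySem.List.pyGetD q 0 0) (PySem.List.pyGetD q 1 0) k)).sum

lemma pvIdx_eq (n : Nat) (i : Int) (h1 : -(n : Int) ≤ i) (h2 : i < (n : Int)) :
    PySem.List.pyIdx? n i = some (if i < 0 then i + n else i).toNat := by
  unfold PySem.List.pyIdx?
  by_cases h : 0 ≤ i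
  · rw [if_pos h, if_pos h2, if_neg (by omega : ¬ i < 0)]
  · rw [if_neg h, if_pos h1, if_pos (by omega : i < 0)]
    congr 1
    omega

lemma pvDecRange_cons (xs : List Int) (l r : Int) (h : l < r + 1) :
    pvDecRange xs l r = pvDecRange (match PySem.List.pyGet? xs l with
      | none => xs
      | some v => if v = 0 then xs else PySem.List.pySetD xs l (v - 1)) (l + 1) r := by
  unfold pvDecRange
  rw [PySem.List.pyRange_one_cons h, List.foldl_cons]

lemma pvDecRange_spec : ∀ (m : Nat) (xs : List Int) (l r : Int), (r + 1 - l).toNat = m →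
    (l ≤ r → -(xs.length : Int) ≤ l ∧ r < (xs.length : Int)) →
    (pvDecRange xs l r).length = xs.length ∧
    ∀ (k : Nat), (pvDecRange xs l r)[k]? =
      (xs[k]?).map (pvDecOp^[pvQCov xs.length l r (k : Int)]) := by
  intro m
  induction m with
  | zero =>
    intro xs l r hm hok
    have hle : r + 1 ≤ l := by omega
    unfold pvDecRange
    rw [PySem.List.pyRange_one_eq_nil hle]
    simp only [List.foldl_nil]
    refine ⟨by simp, fun k => ?_⟩
    have : pvQCov xs.length l r (k : Int) = 0 := by
      unfold pvQCov; split_ifs <;> omega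
    rw [this]
    simp
  | succ m ih =>
    intro xs l r hm hok
    have hlr : l < r + 1 := by omega
    obtain ⟨hl, hr⟩ := hok (by omega)
    -- the position Python's nums[l] actually touches
    set p : Nat := (if l < 0 then l + xs.length else l).toNat with hp
    have hplen : p < xs.length := by rw [hp]; split_ifs <;> omega
    have hget : PySem.List.pyGet? xs l = some xs[p] := by
      unfold PySem.List.pyGet?
      rw [pvIdx_eq xs.length l hl (by omega), ← hp]
      simp [List.getElem?_eq_getElem hplen]
    have hset : ∀ v : Int, PySem.List.pySetD xs l v = xs.set p v := by
      intro v
      unfold PySem.List.pySetD PySem.List.pySet?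
      rw [pvIdx_eq xs.length l hl (by omega), ← hp]
      simp
    set xs' := if xs[p] = 0 then xs else xs.set p (xs[p] - 1) with hxs'
    have hstep : (match PySem.List.pyGet? xs l with
        | none => xs
        | some w => if w = 0 then xs else PySem.List.pySetD xs l (w - 1)) = xs' := by
      rw [hget]
      show (if xs[p] = 0 then xs else PySem.List.pySetD xs l (xs[p] - 1)) = xs'
      rw [hxs']
      by_cases h : xs[p] = 0
      · rw [if_pos h, if_pos h]
      · rw [if_neg h, if_neg h, hset]
    have hlen' : xs'.length = xs.length := by
      rw [hxs']; split_ifs <;> simp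
    have hget' : ∀ (k : Nat), xs'[k]? = if k = p then (xs[k]?).map pvDecOp else xs[k]? := by
      intro k
      by_cases hk : k = p
      · subst hk
        rw [if_pos rfl, hxs']
        by_cases h : xs[p] = 0
        · rw [if_pos h, List.getElem?_eq_getElem hplen]
          simp [pvDecOp, h]
        · rw [if_neg h, List.getElem?_set_self hplen, List.getElem?_eq_getElem hplen]
          simp [pvDecOp, h]

      · rw [if_neg hk, hxs']
        split_ifs with h
        · rfl
        · exact List.getElem?_set_ne (by omega)
    rw [pvDecRange_cons xs l r hlr, hstep]
    obtain ⟨ihlen, ihget⟩ := ih xs' (l + 1) r (by omega)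
      (fun h => by rw [hlen']; exact ⟨by omega, by omega⟩)
    refine ⟨by rw [ihlen, hlen'], fun k => ?_⟩
    rw [ihget k, hget' k]
    rw [hlen']
    by_cases hk : k < xs.length
    · have hcnt : pvQCov xs.length l r (k : Int) =
          pvQCov xs.length (l + 1) r (k : Int) + (if k = p then 1 else 0) := by
        unfold pvQCov
        have hkp : (k = p) ↔ ((k : Int) = l ∨ (k : Int) = l + xs.length) := by
          by_cases hl0 : l < 0
          · rw [hp, if_pos hl0]; omega
          · rw [hp, if_neg hl0]; omega
        split_ifs <;> omega
      rw [hcnt]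
      by_cases hkp : k = p
      · rw [if_pos hkp, if_pos hkp, Option.map_map, Function.iterate_add]
        rfl
      · rw [if_neg hkp, if_neg hkp]
        simp
    · have hnone : xs[k]? = none := List.getElem?_eq_none (by omega)
      have hnone' : xs'[k]? = none := List.getElem?_eq_none (by omega)
      rw [hget' k] at hnone'
      rw [hnone]
      by_cases hkp : k = p
      · omega
      · rw [if_neg hkp] at hnone' ⊢
        simp

lemma pvFold_spec : ∀ (qs : List (List Int)) (xs : List Int),
    (∀ q ∈ qs, pvQok (xs.length : Int) q = true) →
    (qs.foldl (fun acc q => pvDecRange acc (PySem.List.pyGetD q 0 0) (PySem.List.pyGetD q 1 0)) xs).length = xs.length ∧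
    ∀ (k : Nat), (qs.foldl (fun acc q => pvDecRange acc (PySem.List.pyGetD q 0 0) (PySem.List.pyGetD q 1 0)) xs)[k]? =
      (xs[k]?).map (pvDecOp^[pvCnt xs.length qs (k : Int)]) := by
  intro qs
  induction qs with
  | nil =>
    intro xs _
    refine ⟨rfl, fun k => ?_⟩
    simp [pvCnt]
  | cons q qs ih =>
    intro xs hall
    have hq := hall q (by simp)
    match q with
    | [] => simp [pvQok] at hq
    | [l] => simp [pvQok] at hq
    | l :: r :: rest =>
      simp only [pvQok, Bool.or_eq_true, Bool.and_eq_true, decide_eq_true_eq] at hq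
      have hok : l ≤ r → -(xs.length : Int) ≤ l ∧ r < (xs.length : Int) := by
        intro hlr
        rcases hq with h | h
        · omega
        · constructor <;> omega
      have hg0 : PySem.List.pyGetD (l :: r :: rest) 0 0 = l := by simp [pysem]
      have hg1 : PySem.List.pyGetD (l :: r :: rest) 1 0 = r := by simp [pysem]
      rw [List.foldl_cons]
      simp only [hg0, hg1]
      obtain ⟨slen, sget⟩ := pvDecRange_spec (r + 1 - l).toNat xs l r rfl hok
      have hall' : ∀ p ∈ qs, pvQok ((pvDecRange xs l r).length : Int) p = true := by
        rw [slen]; intro p hp; exact hall p (by simp [hp])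
      obtain ⟨ilen, iget⟩ := ih (pvDecRange xs l r) hall'
      refine ⟨by rw [ilen, slen], fun k => ?_⟩
      rw [iget k, sget k, slen, Option.map_map]
      have hcnt : pvCnt xs.length ((l :: r :: rest) :: qs) (k : Int) =
          pvCnt xs.length qs (k : Int) + pvQCov xs.length l r (k : Int) := by
        simp [pvCnt, hg0, hg1]
        omega
      rw [hcnt, Function.iterate_add]

lemma pvDecOp_iter_eq_zero (c : Nat) (x : Int) : pvDecOp^[c] x = 0 ↔ 0 ≤ x ∧ x ≤ (c : Int) := by
  induction c generalizing x with
  | zero => simp; omega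
  | succ n ih =>
    rw [Function.iterate_succ_apply, ih]
    unfold pvDecOp
    split_ifs with h <;> push_cast <;> omega

lemma pvSet_test (ys : List Int) :
    ((PySem.Set.ofList ys).length = 1 ∧ PySem.Set.contains (PySem.Set.ofList ys) 0 = true) ↔
      (ys ≠ [] ∧ ∀ y ∈ ys, y = 0) := by
  constructor
  · rintro ⟨h1, h2⟩
    rw [List.length_eq_one_iff] at h1
    obtain ⟨z, hz⟩ := h1
    rw [PySem.Set.contains_iff, hz] at h2
    simp at h2
    subst h2
    constructor
    · intro hnil
      have : (0 : Int) ∈ PySem.Set.ofList ys := by rw [hz]; simp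
      rw [PySem.Set.mem_ofList] at this
      simp [hnil] at this
    · intro y hy
      have : y ∈ PySem.Set.ofList ys := by rw [PySem.Set.mem_ofList]; exact hy
      rw [hz] at this; simpa using this
  · rintro ⟨hnil, hall⟩
    have h0 : (0 : Int) ∈ PySem.Set.ofList ys := by
      rw [PySem.Set.mem_ofList]
      obtain ⟨y, hy⟩ := List.exists_mem_of_ne_nil ys hnil
      have := hall y hy; subst this; exact hy
    have hmem : ∀ z ∈ PySem.Set.ofList ys, z = 0 := by
      intro z hz; rw [PySem.Set.mem_ofList] at hz; exact hall z hz
    have hnd := PySem.Set.nodup_ofList (xs := ys)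
    have : PySem.Set.ofList ys = [0] := by
      rcases hof : PySem.Set.ofList ys with _ | ⟨a, _ | ⟨b, t⟩⟩
      · rw [hof] at h0; simp at h0
      · have := hmem a (by rw [hof]; simp); simp [this]
      · exfalso
        have ha := hmem a (by rw [hof]; simp)
        have hb := hmem b (by rw [hof]; simp)
        rw [hof] at hnd
        simp [ha, hb] at hnd
    rw [this]
    simp

lemma pvSum_take_set (d : List Int) (j m : Nat) (v : Int) (hj : j < d.length) :
    ((d.set j (d.getD j 0 + v)).take m).sum = (d.take m).sum + (if j < m then v else 0) := by
  induction d generalizing j m with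
  | nil => simp at hj
  | cons x ds ih =>
    cases j with
    | zero =>
      cases m with
      | zero => simp
      | succ m => simp [List.take_succ_cons]; ring
    | succ j =>
      cases m with
      | zero => simp
      | succ m =>
        simp only [List.set_cons_succ, List.take_succ_cons, List.sum_cons, List.getD_cons_succ]
        rw [ih j m (by simpa using hj)]
        simp
        ring

lemma pvRangeUpd_sum (d : List Int) (a b : Int) (n : Nat) (hd : d.length = n + 1)
    (h0 : 0 ≤ a) (hab : a ≤ b) (hb : b < (n : Int)) :
    (PySem.List.pySetD (PySem.List.pySetD d a (PySem.List.pyGetD d a 0 + 1)) (b + 1)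
        (PySem.List.pyGetD (PySem.List.pySetD d a (PySem.List.pyGetD d a 0 + 1)) (b + 1) 0 - 1)).length = n + 1 ∧
    ∀ (k : Nat), k < n →
      ((PySem.List.pySetD (PySem.List.pySetD d a (PySem.List.pyGetD d a 0 + 1)) (b + 1)
          (PySem.List.pyGetD (PySem.List.pySetD d a (PySem.List.pyGetD d a 0 + 1)) (b + 1) 0 - 1)).take (k + 1)).sum =
        (d.take (k + 1)).sum + (if a ≤ (k : Int) ∧ (k : Int) ≤ b then 1 else 0) := by
  have hln : a.toNat < d.length := by omega
  have hA : PySem.List.pySetD d a (PySem.List.pyGetD d a 0 + 1) = d.set a.toNat (d.getD a.toNat 0 + 1) := by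
    rw [PySem.List.pySetD_of_nonneg d (PySem.List.pyGetD d a 0 + 1) h0]
    rw [PySem.List.pyGetD_of_nonneg]
    exact h0
  rw [hA]
  set d1 := d.set a.toNat (d.getD a.toNat 0 + 1) with hd1
  have hd1len : d1.length = n + 1 := by rw [hd1]; simp [hd]
  have hrn : (b + 1).toNat < d1.length := by omega
  have hB : PySem.List.pySetD d1 (b + 1) (PySem.List.pyGetD d1 (b + 1) 0 - 1) =
      d1.set (b + 1).toNat (d1.getD (b + 1).toNat 0 + (-1)) := by
    rw [PySem.List.pySetD_of_nonneg d1 (PySem.List.pyGetD d1 (b + 1) 0 - 1) (by omega)]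
    rw [PySem.List.pyGetD_of_nonneg]
    · rw [sub_eq_add_neg]
    · omega
  rw [hB]
  constructor
  · simp [hd1len]
  · intro k hk
    rw [pvSum_take_set d1 (b + 1).toNat (k + 1) (-1) hrn]
    rw [hd1, pvSum_take_set d a.toNat (k + 1) 1 hln]
    have h1 : (a.toNat < k + 1) ↔ (a ≤ (k : Int)) := by omega
    have h2 : ((b + 1).toNat < k + 1) ↔ ¬((k : Int) ≤ b) := by omega
    by_cases hc1 : a ≤ (k : Int) <;> by_cases hc2 : (k : Int) ≤ b <;>
      simp [h1, h2, hc1, hc2] <;> omega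

lemma pvAddQuery_sum (d : List Int) (l r : Int) (rest : List Int) (n : Nat)
    (hd : d.length = n + 1) (hok : l ≤ r → 0 ≤ l ∧ r < (n : Int)) :
    (pvAddQuery d (l :: r :: rest)).length = n + 1 ∧
    ∀ (k : Nat), k < n → ((pvAddQuery d (l :: r :: rest)).take (k + 1)).sum =
      (d.take (k + 1)).sum + (pvQCov n l r (k : Int) : Int) := by
  have hg0 : PySem.List.pyGetD (l :: r :: rest) 0 0 = l := by simp [pysem]
  have hg1 : PySem.List.pyGetD (l :: r :: rest) 1 0 = r := by simp [pysem]
  have hQ : pvAddQuery d (l :: r :: rest) =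
      (if l ≤ r then
         let t := PySem.List.pySetD d l (PySem.List.pyGetD d l 0 + 1)
         PySem.List.pySetD t (r + 1) (PySem.List.pyGetD t (r + 1) 0 - 1)
       else d) := by
    unfold pvAddQuery
    rw [hg0, hg1]
  rw [hQ]
  by_cases hlr : l ≤ r
  · obtain ⟨hl, hr⟩ := hok hlr
    rw [if_pos hlr]
    obtain ⟨len1, sum1⟩ := pvRangeUpd_sum d l r n hd hl hlr hr
    refine ⟨len1, fun k hk => ?_⟩
    rw [sum1 k hk]
    unfold pvQCov
    split_ifs <;> push_cast <;> omega
  · rw [if_neg hlr]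
    refine ⟨hd, fun k hk => ?_⟩
    unfold pvQCov
    split_ifs <;> push_cast <;> omega

lemma pvDiff_spec : ∀ (qs : List (List Int)) (d : List Int) (n : Nat), d.length = n + 1 →
    (∀ q ∈ qs, pvQok (n : Int) q = true) →
    (qs.foldl pvAddQuery d).length = n + 1 ∧
    ∀ (k : Nat), k < n → ((qs.foldl pvAddQuery d).take (k + 1)).sum =
      (d.take (k + 1)).sum + (pvCnt n qs (k : Int) : Int) := by
  intro qs
  induction qs with
  | nil =>
    intro d n hd _
    exact ⟨hd, fun k _ => by simp [pvCnt]⟩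
  | cons q qs ih =>
    intro d n hd hall
    have hq := hall q (by simp)
    match q with
    | [] => simp [pvQok] at hq
    | [l] => simp [pvQok] at hq
    | l :: r :: rest =>
      simp only [pvQok, Bool.or_eq_true, Bool.and_eq_true, decide_eq_true_eq] at hq
      have hok : l ≤ r → 0 ≤ l ∧ r < (n : Int) := by
        intro hlr
        rcases hq with h | h
        · omega
        · exact h
      rw [List.foldl_cons]
      obtain ⟨slen, ssum⟩ := pvAddQuery_sum d l r rest n hd hok
      obtain ⟨ilen, isum⟩ := ih (pvAddQuery d (l :: r :: rest)) n slen
        (fun p hp => hall p (by simp [hp]))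
      refine ⟨ilen, fun k hk => ?_⟩
      rw [isum k hk, ssum k hk]
      have hg0 : PySem.List.pyGetD (l :: r :: rest) 0 0 = l := by simp [pysem]
      have hg1 : PySem.List.pyGetD (l :: r :: rest) 1 0 = r := by simp [pysem]
      have hcnt : (pvCnt n ((l :: r :: rest) :: qs) (k : Int) : Int) =
          (pvCnt n qs (k : Int) : Int) + (pvQCov n l r (k : Int) : Int) := by
        simp [pvCnt, hg0, hg1]
        ring
      rw [hcnt]
      ring

lemma pvCheck_spec : ∀ (xs ds : List Int) (cov : Int), xs.length ≤ ds.length →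
    (pvCheck xs ds cov = true ↔
      ∀ (k : Nat) (h : k < xs.length), 0 ≤ xs[k] ∧ xs[k] ≤ cov + ((ds.take (k + 1)).sum)) := by
  intro xs
  induction xs with
  | nil => intro ds cov _; simp [pvCheck]
  | cons x xs ih =>
    intro ds cov hlen
    cases ds with
    | nil => simp at hlen
    | cons dv ds =>
      simp only [pvCheck]
      by_cases hb : 0 ≤ x ∧ x ≤ cov + dv
      · rw [if_pos hb]
        rw [ih ds (cov + dv) (by simpa using hlen)]
        constructor
        · intro hall k hk
          cases k with
          | zero => simp [List.take_succ_cons]; omega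
          | succ k =>
            have := hall k (by simpa using hk)
            simpa [List.take_succ_cons, add_assoc] using this
        · intro hall k hk
          have := hall (k + 1) (by simpa using hk)
          simpa [List.take_succ_cons, add_assoc] using this
      · rw [if_neg hb]
        refine iff_of_false (by simp) ?_
        intro hall
        have := hall 0 (by simp)
        simp [List.take_succ_cons] at this
        omega

-- ===== VERDICT (by name: the statement is the Claim_ definition above) =====
theorem isZeroArray_spec : Claim_equal_isZeroArray := by
  intro nums qs _dom hpre
  obtain ⟨hne, hall'⟩ := hpre
  have hall : ∀ q ∈ qs, pvQok (nums.length : Int) q = true := by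
    intro q hq; exact List.all_eq_true.mp hall' q hq
  unfold Spec_isZeroArray
  -- the common characterisation: every entry satisfies 0 ≤ nums[k] ≤ (#decrements at k)
  have hAiff : isZeroArray nums qs = true ↔
      ∀ (k : Nat) (h : k < nums.length), 0 ≤ nums[k] ∧ nums[k] ≤ (pvCnt nums.length qs (k : Int) : Int) := by
    obtain ⟨flen, fget⟩ := pvFold_spec qs nums hall
    set final := qs.foldl (fun acc q => pvDecRange acc (PySem.List.pyGetD q 0 0) (PySem.List.pyGetD q 1 0)) nums with hfinal
    have hA : isZeroArray nums qs =
        (if (PySem.Set.ofList final).length = 1 ∧ PySem.Set.contains (PySem.Set.ofList final) 0 = true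
         then true else false) := rfl
    rw [hA]
    constructor
    · intro h
      split_ifs at h with hcond
      have := (pvSet_test final).mp hcond
      intro k hk
      have hkf : k < final.length := by rw [flen]; exact hk
      have hmem := List.forall_mem_iff_forall_getElem.mp this.2 k hkf
      have : final[k]? = some final[k] := List.getElem?_eq_getElem hkf
      rw [fget k, List.getElem?_eq_getElem hk] at this
      simp only [Option.map_some] at this
      have hz : pvDecOp^[pvCnt nums.length qs (k : Int)] nums[k] = 0 := by
        rw [← hmem]; exact Option.some_injective _ this
      exact (pvDecOp_iter_eq_zero _ _).mp hz
    · intro h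
      have hcond : (PySem.Set.ofList final).length = 1 ∧
          PySem.Set.contains (PySem.Set.ofList final) 0 = true := by
        refine (pvSet_test final).mpr ⟨?_, ?_⟩
        · intro hnil
          rw [hnil] at flen
          exact hne (List.eq_nil_of_length_eq_zero flen.symm)
        · refine List.forall_mem_iff_forall_getElem.mpr fun k hkf => ?_
          have hk : k < nums.length := by rw [← flen]; exact hkf
          have h1 : final[k]? = some (pvDecOp^[pvCnt nums.length qs (k : Int)] nums[k]) := by
            rw [fget k, List.getElem?_eq_getElem hk]; rfl
          have h2 : final[k]? = some final[k] := List.getElem?_eq_getElem hkf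
          have := (Option.some_injective _ (h2.symm.trans h1))
          rw [this]
          exact (pvDecOp_iter_eq_zero _ _).mpr (h k hk)
      rw [if_pos hcond]
  have hBiff : isZeroArray_alt nums qs = true ↔
      ∀ (k : Nat) (h : k < nums.length), 0 ≤ nums[k] ∧ nums[k] ≤ (pvCnt nums.length qs (k : Int) : Int) := by
    have hB : isZeroArray_alt nums qs =
        pvCheck nums (qs.foldl pvAddQuery (List.replicate (nums.length + 1) 0)) 0 := rfl
    rw [hB]
    obtain ⟨dlen, dsum⟩ := pvDiff_spec qs (List.replicate (nums.length + 1) 0) nums.length (by simp) hall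
    rw [pvCheck_spec nums _ 0 (by rw [dlen]; omega)]
    constructor
    · intro h k hk
      have := h k hk
      rw [dsum k hk] at this
      simpa using this
    · intro h k hk
      have := h k hk
      rw [dsum k hk]
      simpa using this
  rw [Bool.eq_iff_iff]
  exact hAiff.trans hBiff.symm
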